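-- pv_equiv track=rewrite | github.com/17mirinae/CTF-Python | Python/DAYEA/백트래킹/연산자 끼워넣기.py | setOperator
-- ===== SOURCE A (Python) =====
-- def setOperator(N, add, sub, mul, div):
--     operator = []
--     for i in range(N-1):
--         if add > 0:
--             operator.append("+")
--             add -= 1
--         elif sub > 0:
--             operator.append("-")
--             sub -= 1
--         elif mul > 0:
--             operator.append("*")
--             mul -= 1
--         elif div > 0:
--             operator.append("/")
--             div -= 1
--     return operator
-- ===== SOURCE B (Python) =====
-- def setOperator(N, add, sub, mul, div):
--     remaining = N - 1
--     operator = []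
--     for sym, cnt in (("+", add), ("-", sub), ("*", mul), ("/", div)):
--         if remaining <= 0:
--             break
--         take = min(max(cnt, 0), remaining)
--         operator.extend([sym] * take)
--         remaining -= take
--     return operator
-- ===== Notes on version B (the rewrite author's own statement) =====
-- stated objective: faster
-- what changed: Replaces A's slot-by-slot greedy loop over range(N-1) (a branch chain executed N-1 times) by a single pass over the four ordered (symbol, count) pairs that emits each operator block at once with [sym]*take where take = min(max(count,0), remaining), breaking when the budget is spent.
import Mathlib
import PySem

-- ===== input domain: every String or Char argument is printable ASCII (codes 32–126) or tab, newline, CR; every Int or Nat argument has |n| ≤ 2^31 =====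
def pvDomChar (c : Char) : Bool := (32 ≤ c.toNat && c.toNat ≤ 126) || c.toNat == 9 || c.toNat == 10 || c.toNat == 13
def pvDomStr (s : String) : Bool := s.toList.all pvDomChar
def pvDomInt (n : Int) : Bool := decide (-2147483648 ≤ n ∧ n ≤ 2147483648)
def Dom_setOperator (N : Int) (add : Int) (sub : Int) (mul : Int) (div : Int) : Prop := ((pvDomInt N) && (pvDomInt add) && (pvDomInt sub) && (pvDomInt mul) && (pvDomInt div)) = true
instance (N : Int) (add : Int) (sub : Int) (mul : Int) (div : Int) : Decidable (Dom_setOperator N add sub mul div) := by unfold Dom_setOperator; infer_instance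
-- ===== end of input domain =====

-- B replaces A's slot-by-slot greedy loop over range(N-1) by one pass over the four
-- (symbol, count) pairs, emitting each operator block at once via list repetition (objective: faster; measured).

-- ===== PORT A =====
-- one iteration of A's loop body on the state (operator, add, sub, mul, div)
def stepA (st : List String × Int × Int × Int × Int) : List String × Int × Int × Int × Int :=
  match st with
  | (op, a, s, m, d) =>
    if a > 0 then (op ++ ["+"], a - 1, s, m, d)
    else if s > 0 then (op ++ ["-"], a, s - 1, m, d)
    else if m > 0 then (op ++ ["*"], a, s, m - 1, d)
    else if d > 0 then (op ++ ["/"], a, s, m, d - 1)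
    else (op, a, s, m, d)

def setOperator (N : Int) (add : Int) (sub : Int) (mul : Int) (div : Int) : List String :=
  ((PySem.List.pyRange 0 (N - 1) 1).foldl (fun st _ => stepA st) ([], add, sub, mul, div)).1

-- ===== PORT B =====
-- the for/break loop of Source B over the (symbol, count) pairs, carrying 'remaining'
def altGo : List (String × Int) → Int → List String
  | [], _ => []
  | (sym, cnt) :: rest, remaining =>
      if remaining ≤ 0 then []
      else
        let take := min (max cnt 0) remaining
        List.replicate take.toNat sym ++ altGo rest (remaining - take)

def setOperator_alt (N : Int) (add : Int) (sub : Int) (mul : Int) (div : Int) : List String :=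
  altGo [("+", add), ("-", sub), ("*", mul), ("/", div)] (N - 1)

-- ===== PRECONDITION & SPEC =====
def Spec_setOperator (N : Int) (add : Int) (sub : Int) (mul : Int) (div : Int) (out : List String) : Prop := out = setOperator_alt N add sub mul div
instance (N : Int) (add : Int) (sub : Int) (mul : Int) (div : Int) (out : List String) : Decidable (Spec_setOperator N add sub mul div out) := by unfold Spec_setOperator; infer_instance

-- ===== CLAIM (what is proved, stated in full; the proofs are below) =====
def Claim_equal_setOperator : Prop := ∀ (N : Int) (add : Int) (sub : Int) (mul : Int) (div : Int), Dom_setOperator N add sub mul div → Spec_setOperator N add sub mul div (setOperator N add sub mul div)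

-- ===== LEMMAS AND PROOFS =====

-- a foldl whose function ignores the elements only iterates
theorem foldl_const_eq_iterate {α β : Type} (f : α → α) (init : α) (l : List β) :
    l.foldl (fun st _ => f st) init = f^[l.length] init := by
  induction l generalizing init with
  | nil => rfl
  | cons x xs ih => simp [List.foldl_cons, ih, Function.iterate_succ_apply]

-- unfolding the four-entry altGo on a positive budget whose head count is positive
theorem altGo_cons_pos (sym : String) (cnt : Int) (rest : List (String × Int)) (n : Nat)
    (hc : cnt > 0) :
    altGo ((sym, cnt) :: rest) ((n : Int) + 1)
      = sym :: altGo ((sym, cnt - 1) :: rest) (n : Int) := by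
  by_cases hn : (n : Int) ≤ 0
  · have hn0 : n = 0 := by omega
    subst hn0
    simp only [altGo]
    have htake : min (max cnt 0) (1 : Int) = 1 := by omega
    cases rest <;> simp [altGo, htake]
  · simp only [altGo, if_neg (by omega : ¬ ((n : Int) + 1 ≤ 0)), if_neg hn]
    have h1 : (min (max cnt 0) ((n : Int) + 1)).toNat
        = (min (max (cnt - 1) 0) (n : Int)).toNat + 1 := by omega
    have h2 : (n : Int) + 1 - min (max cnt 0) ((n : Int) + 1)
        = (n : Int) - min (max (cnt - 1) 0) (n : Int) := by omega
    simp [h1, h2, List.replicate_succ]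

-- a non-positive head count contributes nothing
theorem altGo_cons_nonpos (sym : String) (cnt : Int) (rest : List (String × Int)) (r : Int)
    (hc : ¬ cnt > 0) (hr : ¬ r ≤ 0) :
    altGo ((sym, cnt) :: rest) r = altGo rest r := by
  simp only [altGo, if_neg hr]
  have h0 : max cnt 0 = 0 := by omega
  have : min (max cnt 0) r = 0 := by omega
  simp [this]

theorem altGo_all_nonpos (a s m d : Int) (r : Int)
    (ha : ¬ a > 0) (hs : ¬ s > 0) (hm : ¬ m > 0) (hd : ¬ d > 0) :
    altGo [("+", a), ("-", s), ("*", m), ("/", d)] r = [] := by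
  by_cases hr : r ≤ 0
  · simp [altGo, hr]
  · rw [altGo_cons_nonpos _ _ _ _ ha hr, altGo_cons_nonpos _ _ _ _ hs hr,
        altGo_cons_nonpos _ _ _ _ hm hr, altGo_cons_nonpos _ _ _ _ hd hr]
    simp [altGo]

-- main invariant: n iterations of A's loop body produce B's block decomposition of budget n
theorem iterate_eq_altGo (n : Nat) :
    ∀ (acc : List String) (a s m d : Int),
      (stepA^[n] (acc, a, s, m, d)).1
        = acc ++ altGo [("+", a), ("-", s), ("*", m), ("/", d)] (n : Int) := by
  induction n with
  | zero =>
    intro acc a s m d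
    simp [altGo]
  | succ n ih =>
    intro acc a s m d
    rw [Function.iterate_succ_apply]
    by_cases ha : a > 0
    · rw [show stepA (acc, a, s, m, d) = (acc ++ ["+"], a - 1, s, m, d) by simp [stepA, ha]]
      rw [ih]
      rw [show (((n + 1 : Nat)) : Int) = (n : Int) + 1 by push_cast; ring]
      rw [altGo_cons_pos _ _ _ _ ha]
      simp
    · by_cases hs : s > 0
      · rw [show stepA (acc, a, s, m, d) = (acc ++ ["-"], a, s - 1, m, d) by
          simp [stepA, ha, hs]]
        rw [ih]
        rw [show (((n + 1 : Nat)) : Int) = (n : Int) + 1 by push_cast; ring]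
        have hnn : ¬ ((n : Int) + 1 ≤ 0) := by omega
        rw [altGo_cons_nonpos _ _ _ _ ha hnn, altGo_cons_pos _ _ _ _ hs]
        by_cases hn : (n : Int) ≤ 0
        · have h0 : (n : Int) = 0 := by omega
          rw [h0]; simp [altGo]
        · rw [altGo_cons_nonpos _ _ _ _ ha hn]
          simp
      · by_cases hm : m > 0
        · rw [show stepA (acc, a, s, m, d) = (acc ++ ["*"], a, s, m - 1, d) by
            simp [stepA, ha, hs, hm]]
          rw [ih]
          rw [show (((n + 1 : Nat)) : Int) = (n : Int) + 1 by push_cast; ring]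
          have hnn : ¬ ((n : Int) + 1 ≤ 0) := by omega
          rw [altGo_cons_nonpos _ _ _ _ ha hnn, altGo_cons_nonpos _ _ _ _ hs hnn,
              altGo_cons_pos _ _ _ _ hm]
          by_cases hn : (n : Int) ≤ 0
          · have h0 : (n : Int) = 0 := by omega
            rw [h0]; simp [altGo]
          · rw [altGo_cons_nonpos _ _ _ _ ha hn, altGo_cons_nonpos _ _ _ _ hs hn]
            simp
        · by_cases hd : d > 0
          · rw [show stepA (acc, a, s, m, d) = (acc ++ ["/"], a, s, m, d - 1) by
              simp [stepA, ha, hs, hm, hd]]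
            rw [ih]
            rw [show (((n + 1 : Nat)) : Int) = (n : Int) + 1 by push_cast; ring]
            have hnn : ¬ ((n : Int) + 1 ≤ 0) := by omega
            rw [altGo_cons_nonpos _ _ _ _ ha hnn, altGo_cons_nonpos _ _ _ _ hs hnn,
                altGo_cons_nonpos _ _ _ _ hm hnn, altGo_cons_pos _ _ _ _ hd]
            by_cases hn : (n : Int) ≤ 0
            · have h0 : (n : Int) = 0 := by omega
              rw [h0]; simp [altGo]
            · rw [altGo_cons_nonpos _ _ _ _ ha hn, altGo_cons_nonpos _ _ _ _ hs hn,
                  altGo_cons_nonpos _ _ _ _ hm hn]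
              simp
          · rw [show stepA (acc, a, s, m, d) = (acc, a, s, m, d) by
              simp [stepA, ha, hs, hm, hd]]
            rw [ih]
            rw [altGo_all_nonpos _ _ _ _ _ ha hs hm hd, altGo_all_nonpos _ _ _ _ _ ha hs hm hd]

-- ===== VERDICT (by name: the statement is the Claim_ definition above) =====
theorem setOperator_spec : Claim_equal_setOperator := by
  intro N add sub mul div _
  unfold Spec_setOperator setOperator setOperator_alt
  rw [foldl_const_eq_iterate, PySem.List.length_pyRange_one, iterate_eq_altGo]
  by_cases h : N - 1 ≤ 0
  · have h0 : (N - 1 - 0).toNat = 0 := by omega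
    rw [h0]
    simp [altGo, h]
  · have : ((N - 1 - 0).toNat : Int) = N - 1 := by omega
    rw [this]
    simp
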